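-- pv_equiv track=rewrite | github.com/ignir/advent-of-code | 2022/day 25/day25.py | to_snafu
-- ===== SOURCE A (Python) =====
-- def to_snafu(value: int) -> str:
--     result = ""
--     quotient = value
--     while True:
--         quotient, remainder = divmod(quotient, 5)
--         if remainder == 3:
--             remainder = "="
--             quotient += 1
--         elif remainder == 4:
--             remainder = "-"
--             quotient += 1
--         result = str(remainder) + result
--         if quotient == 0:
--             break
--     return result
-- ===== SOURCE B (Python) =====
-- NEG = {"=": "2", "-": "1", "0": "0", "1": "-", "2": "="}
--
-- def _snafu_nonneg(value):
--     # pass 1: plain base-5 digits, least-significant first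
--     if value == 0:
--         return "0"
--     digits = []
--     n = value
--     while n > 0:
--         n, r = divmod(n, 5)
--         digits.append(r)
--     # pass 2: balance the digits with a carry
--     out = []
--     carry = 0
--     for d in digits:
--         t = d + carry
--         if t >= 3:
--             t -= 5
--             carry = 1
--         else:
--             carry = 0
--         out.append("=-012"[t + 2])
--     if carry:
--         out.append("1")
--     return "".join(reversed(out))
--
-- def to_snafu(value: int) -> str:
--     # a negative number's balanced-base-5 digits are the digit-wise negation
--     if value < 0:
--         return "".join(NEG[c] for c in _snafu_nonneg(-value))
--     return _snafu_nonneg(value)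
-- ===== Notes on version B (the rewrite author's own statement) =====
-- stated objective: alternative
-- what changed: B splits the work into stages: negative inputs are reduced to the non-negative case by digit-wise negation of the balanced digits, and non-negative inputs are handled by first extracting the plain base-5 digits in one loop and then balancing them in a separate carry pass, instead of A's single loop that patches the two high remainders and bumps the quotient in-flight.
import Mathlib
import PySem

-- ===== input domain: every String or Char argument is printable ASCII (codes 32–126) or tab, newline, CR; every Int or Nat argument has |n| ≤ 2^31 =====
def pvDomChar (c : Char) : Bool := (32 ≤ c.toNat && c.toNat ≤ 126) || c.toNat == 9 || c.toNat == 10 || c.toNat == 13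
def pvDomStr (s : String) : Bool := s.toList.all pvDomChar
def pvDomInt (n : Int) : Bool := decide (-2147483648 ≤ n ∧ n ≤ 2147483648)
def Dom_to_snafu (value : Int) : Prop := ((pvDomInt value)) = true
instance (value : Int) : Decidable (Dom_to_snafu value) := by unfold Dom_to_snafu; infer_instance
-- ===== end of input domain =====

-- B reduces negative inputs to the non-negative case by digit-wise negation, and handles
-- non-negative inputs by two staged passes (extract plain base-5 digits, then balance with a
-- carry), instead of A's single patch-the-remainder loop (objective: alternative).

-- ===== PORT A =====
-- one body of A's while-True loop: divmod(quotient,5), patch remainder 3/4, return (new quotient, emitted string)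
def toSnafuStepA (q : Int) : Int × String :=
  if PySem.Int.mod q 5 = 3 then (PySem.Int.floordiv q 5 + 1, "=")
  else if PySem.Int.mod q 5 = 4 then (PySem.Int.floordiv q 5 + 1, "-")
  else (PySem.Int.floordiv q 5, PySem.Int.toStr (PySem.Int.mod q 5))

theorem toSnafuStepA_dec (q : Int) : (toSnafuStepA q).1 ≠ 0 → (toSnafuStepA q).1.natAbs < q.natAbs := by
  have h1 := PySem.Int.floordiv_mul_add_mod q 5
  have h2 := PySem.Int.mod_nonneg q (b := 5) (by omega)
  have h3 := PySem.Int.mod_lt q (b := 5) (by omega)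
  unfold toSnafuStepA
  split_ifs with hm hm' <;> simp only <;> omega

def toSnafuLoopA (q : Int) (result : String) : String :=
  let p := toSnafuStepA q
  if p.1 = 0 then p.2 ++ result else toSnafuLoopA p.1 (p.2 ++ result)
termination_by q.natAbs
decreasing_by exact toSnafuStepA_dec q (by assumption)

def to_snafu (value : Int) : String := toSnafuLoopA value ""

-- ===== PORT B =====
-- pass 1 of B: plain base-5 digits of n, least-significant first (the `while n > 0` loop)
def snafuDigitsB (n : Int) : List Int :=
  if h : 0 < n then PySem.Int.mod n 5 :: snafuDigitsB (PySem.Int.floordiv n 5) else []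
termination_by n.natAbs
decreasing_by
  have h1 := PySem.Int.floordiv_mul_add_mod n 5
  have h2 := PySem.Int.mod_nonneg n (b := 5) (by omega)
  have h3 := PySem.Int.mod_lt n (b := 5) (by omega)
  omega

-- "=-012"[t + 2]
def balChar (t : Int) : Char := (PySem.Str.pyGet? "=-012" (t + 2)).get!

-- pass 2 of B: the `for d in digits` carry loop plus the trailing `if carry: out.append('1')`
def balancePass : List Int → Int → List Char
  | [], carry => if carry ≠ 0 then ['1'] else []
  | d :: ds, carry =>
      let t := d + carry
      if t ≥ 3 then balChar (t - 5) :: balancePass ds 1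
      else balChar t :: balancePass ds 0

-- the NEG table (hand-ported dict lookup; exact on the five chars _snafu_nonneg produces)
def negCharB (c : Char) : Char :=
  if c = '=' then '2' else if c = '-' then '1' else if c = '0' then '0'
  else if c = '1' then '-' else if c = '2' then '=' else c

def snafuNonnegB (value : Int) : String :=
  if value = 0 then "0"
  else String.ofList ((balancePass (snafuDigitsB value) 0).reverse)

def to_snafu_alt (value : Int) : String :=
  if value < 0 then String.ofList ((snafuNonnegB (-value)).toList.map negCharB)
  else snafuNonnegB value

-- ===== PRECONDITION & SPEC =====
def Spec_to_snafu (value : Int) (out : String) : Prop := out = to_snafu_alt value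
instance (value : Int) (out : String) : Decidable (Spec_to_snafu value out) := by unfold Spec_to_snafu; infer_instance

-- ===== CLAIM (what is proved, stated in full; the proofs are below) =====
def Claim_equal_to_snafu : Prop := ∀ (value : Int), Dom_to_snafu value → Spec_to_snafu value (to_snafu value)

-- ===== LEMMAS AND PROOFS =====

-- list-level view of A's loop (proof helper only)
def snafuListA (q : Int) : List Char :=
  let p := toSnafuStepA q
  if p.1 = 0 then p.2.toList else snafuListA p.1 ++ p.2.toList
termination_by q.natAbs
decreasing_by exact toSnafuStepA_dec q (by assumption)

theorem loopA_eq_listA : ∀ (n : Nat) (q : Int), q.natAbs ≤ n → ∀ (res : String),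
    toSnafuLoopA q res = String.ofList (snafuListA q) ++ res := by
  intro n
  induction n with
  | zero =>
    intro q hq res
    have h0 : (toSnafuStepA q).1 = 0 := by
      by_contra h; exact absurd (toSnafuStepA_dec q h) (by omega)
    conv_lhs => rw [toSnafuLoopA]
    conv_rhs => rw [snafuListA]
    rw [h0]; simp
  | succ n ih =>
    intro q hq res
    by_cases h0 : (toSnafuStepA q).1 = 0
    · conv_lhs => rw [toSnafuLoopA]
      conv_rhs => rw [snafuListA]
      rw [h0]; simp
    · have hlt := toSnafuStepA_dec q h0
      conv_lhs => rw [toSnafuLoopA]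
      conv_rhs => rw [snafuListA]
      simp only [if_neg h0]
      rw [ih _ (by omega)]
      simp [String.append_assoc]

-- A's step on a negative argument is the digit-wise negation of its step on the positive one
theorem stepA_neg (v : Int) (hv : 0 < v) :
    toSnafuStepA (-v) = (-(toSnafuStepA v).1, String.ofList ((toSnafuStepA v).2.toList.map negCharB)) := by
  have h1 := PySem.Int.floordiv_mul_add_mod v 5
  have h2 := PySem.Int.mod_nonneg v (b := 5) (by omega)
  have h3 := PySem.Int.mod_lt v (b := 5) (by omega)
  have h1' := PySem.Int.floordiv_mul_add_mod (-v) 5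
  have h2' := PySem.Int.mod_nonneg (-v) (b := 5) (by omega)
  have h3' := PySem.Int.mod_lt (-v) (b := 5) (by omega)
  have hr : PySem.Int.mod v 5 = 0 ∨ PySem.Int.mod v 5 = 1 ∨ PySem.Int.mod v 5 = 2 ∨
      PySem.Int.mod v 5 = 3 ∨ PySem.Int.mod v 5 = 4 := by omega
  unfold toSnafuStepA
  rcases hr with hm | hm | hm | hm | hm
  · have hm' : PySem.Int.mod (-v) 5 = 0 := by omega
    have hf' : PySem.Int.floordiv (-v) 5 = -(PySem.Int.floordiv v 5) := by omega
    simp only [hm, hm', hf']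
    norm_num
    exact (by decide : String.ofList ((PySem.Int.toStr 0).toList.map negCharB) = PySem.Int.toStr 0).symm
  · have hm' : PySem.Int.mod (-v) 5 = 4 := by omega
    have hf' : PySem.Int.floordiv (-v) 5 = -(PySem.Int.floordiv v 5) - 1 := by omega
    simp only [hm, hm', hf']
    norm_num
    exact (by decide : String.ofList ((PySem.Int.toStr 1).toList.map negCharB) = "-").symm
  · have hm' : PySem.Int.mod (-v) 5 = 3 := by omega
    have hf' : PySem.Int.floordiv (-v) 5 = -(PySem.Int.floordiv v 5) - 1 := by omega
    simp only [hm, hm', hf']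
    norm_num
    exact (by decide : String.ofList ((PySem.Int.toStr 2).toList.map negCharB) = "=").symm
  · have hm' : PySem.Int.mod (-v) 5 = 2 := by omega
    have hf' : PySem.Int.floordiv (-v) 5 = -(PySem.Int.floordiv v 5) - 1 := by omega
    simp only [hm, hm', hf']
    norm_num
    constructor
    · ring
    · exact (by decide : String.ofList (("=" : String).toList.map negCharB) = PySem.Int.toStr 2).symm
  · have hm' : PySem.Int.mod (-v) 5 = 1 := by omega
    have hf' : PySem.Int.floordiv (-v) 5 = -(PySem.Int.floordiv v 5) - 1 := by omega
    simp only [hm, hm', hf']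
    norm_num
    constructor
    · ring
    · exact (by decide : String.ofList (("-" : String).toList.map negCharB) = PySem.Int.toStr 1).symm

theorem listA_neg : ∀ (n : Nat) (v : Int), v.natAbs ≤ n → 0 < v →
    snafuListA (-v) = (snafuListA v).map negCharB := by
  intro n
  induction n with
  | zero => intro v hv hpos; omega
  | succ n ih =>
    intro v hv hpos
    have hs := stepA_neg v hpos
    have hnn : 0 ≤ (toSnafuStepA v).1 := by
      have h1 := PySem.Int.floordiv_mul_add_mod v 5
      have h2 := PySem.Int.mod_nonneg v (b := 5) (by omega)
      have h3 := PySem.Int.mod_lt v (b := 5) (by omega)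
      unfold toSnafuStepA
      split_ifs <;> simp only <;> omega
    by_cases h0 : (toSnafuStepA v).1 = 0
    · conv_lhs => rw [snafuListA]
      conv_rhs => rw [snafuListA]
      rw [hs]
      simp [h0]
    · have hlt := toSnafuStepA_dec v h0
      conv_lhs => rw [snafuListA]
      conv_rhs => rw [snafuListA]
      rw [hs]
      simp only [neg_eq_zero, if_neg h0]
      rw [ih _ (by omega) (by omega)]
      simp [List.map_append]

-- the two staged passes of B produce exactly A's digits: carry c into the base-5 digits of v
-- corresponds to A's loop run on v + c
theorem listA_pos : ∀ (n : Nat) (v c : Int), v.natAbs ≤ n → 0 ≤ v → (c = 0 ∨ c = 1) → 0 < v + c →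
    snafuListA (v + c) = (balancePass (snafuDigitsB v) c).reverse := by
  intro n
  induction n with
  | zero =>
    intro v c hv h0 hc hpos
    have hv0 : v = 0 := by omega
    have hc1 : c = 1 := by omega
    subst hv0; subst hc1
    rw [snafuDigitsB]
    norm_num [balancePass]
    rw [snafuListA]
    simp [toSnafuStepA, (by decide : PySem.Int.mod ((0:Int)+1) 5 = 1),
          (by decide : PySem.Int.floordiv ((0:Int)+1) 5 = 0)]
    decide
  | succ n ih =>
    intro v c hv h0 hc hpos
    by_cases hv0 : v = 0
    · subst hv0
      have hc1 : c = 1 := by omega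
      subst hc1
      rw [snafuDigitsB]
      norm_num [balancePass]
      rw [snafuListA]
      simp [toSnafuStepA, (by decide : PySem.Int.mod ((0:Int)+1) 5 = 1),
            (by decide : PySem.Int.floordiv ((0:Int)+1) 5 = 0)]
      decide
    · have hvpos : 0 < v := by omega
      have h1 := PySem.Int.floordiv_mul_add_mod v 5
      have h2 := PySem.Int.mod_nonneg v (b := 5) (by omega)
      have h3 := PySem.Int.mod_lt v (b := 5) (by omega)
      have hqnn : 0 ≤ PySem.Int.floordiv v 5 := by omega
      have hqlt : (PySem.Int.floordiv v 5).natAbs ≤ n := by omega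
      have h1c := PySem.Int.floordiv_mul_add_mod (v + c) 5
      have h2c := PySem.Int.mod_nonneg (v + c) (b := 5) (by omega)
      have h3c := PySem.Int.mod_lt (v + c) (b := 5) (by omega)
      rw [snafuDigitsB, dif_pos hvpos]
      have ht : PySem.Int.mod v 5 + c = 0 ∨ PySem.Int.mod v 5 + c = 1 ∨
          PySem.Int.mod v 5 + c = 2 ∨ PySem.Int.mod v 5 + c = 3 ∨
          PySem.Int.mod v 5 + c = 4 ∨ PySem.Int.mod v 5 + c = 5 := by omega
      rcases ht with ht | ht | ht | ht | ht | ht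
      · have hm : PySem.Int.mod (v + c) 5 = PySem.Int.mod v 5 + c := by omega
        have hf : PySem.Int.floordiv (v + c) 5 = PySem.Int.floordiv v 5 := by omega
        simp only [balancePass, ht, if_neg (by omega : ¬ (0:Int) ≥ 3),
                   if_neg (by omega : ¬ (1:Int) ≥ 3), if_neg (by omega : ¬ (2:Int) ≥ 3)]
        conv_lhs => rw [snafuListA]
        simp only [toSnafuStepA, hm, ht, hf]
        norm_num
        rw [← PySem.Int.floordiv_eq_ediv_of_pos (show (0:Int) < 5 by norm_num)]
        by_cases hq0 : PySem.Int.floordiv v 5 = 0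
        · rw [if_pos hq0, hq0, snafuDigitsB]
          norm_num [balancePass]
          decide
        · rw [if_neg hq0]
          have := ih (PySem.Int.floordiv v 5) 0 hqlt hqnn (Or.inl rfl) (by omega)
          rw [add_zero] at this
          rw [this]
          congr 1
      · have hm : PySem.Int.mod (v + c) 5 = PySem.Int.mod v 5 + c := by omega
        have hf : PySem.Int.floordiv (v + c) 5 = PySem.Int.floordiv v 5 := by omega
        simp only [balancePass, ht, if_neg (by omega : ¬ (0:Int) ≥ 3),
                   if_neg (by omega : ¬ (1:Int) ≥ 3), if_neg (by omega : ¬ (2:Int) ≥ 3)]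
        conv_lhs => rw [snafuListA]
        simp only [toSnafuStepA, hm, ht, hf]
        norm_num
        rw [← PySem.Int.floordiv_eq_ediv_of_pos (show (0:Int) < 5 by norm_num)]
        by_cases hq0 : PySem.Int.floordiv v 5 = 0
        · rw [if_pos hq0, hq0, snafuDigitsB]
          norm_num [balancePass]
          decide
        · rw [if_neg hq0]
          have := ih (PySem.Int.floordiv v 5) 0 hqlt hqnn (Or.inl rfl) (by omega)
          rw [add_zero] at this
          rw [this]
          congr 1
      · have hm : PySem.Int.mod (v + c) 5 = PySem.Int.mod v 5 + c := by omega
        have hf : PySem.Int.floordiv (v + c) 5 = PySem.Int.floordiv v 5 := by omega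
        simp only [balancePass, ht, if_neg (by omega : ¬ (0:Int) ≥ 3),
                   if_neg (by omega : ¬ (1:Int) ≥ 3), if_neg (by omega : ¬ (2:Int) ≥ 3)]
        conv_lhs => rw [snafuListA]
        simp only [toSnafuStepA, hm, ht, hf]
        norm_num
        rw [← PySem.Int.floordiv_eq_ediv_of_pos (show (0:Int) < 5 by norm_num)]
        by_cases hq0 : PySem.Int.floordiv v 5 = 0
        · rw [if_pos hq0, hq0, snafuDigitsB]
          norm_num [balancePass]
          decide
        · rw [if_neg hq0]
          have := ih (PySem.Int.floordiv v 5) 0 hqlt hqnn (Or.inl rfl) (by omega)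
          rw [add_zero] at this
          rw [this]
          congr 1
      · have hm : PySem.Int.mod (v + c) 5 =
            (if PySem.Int.mod v 5 + c = 5 then 0 else PySem.Int.mod v 5 + c) := by
          split_ifs <;> omega
        have hf : PySem.Int.floordiv (v + c) 5 =
            PySem.Int.floordiv v 5 + (if PySem.Int.mod v 5 + c = 5 then 1 else 0) := by
          split_ifs <;> omega
        simp only [balancePass, ht, if_pos (by omega : (3:Int) ≥ 3),
                   if_pos (by omega : (4:Int) ≥ 3), if_pos (by omega : (5:Int) ≥ 3)]
        conv_lhs => rw [snafuListA]
        simp only [toSnafuStepA, hm, ht, hf]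
        norm_num
        rw [← PySem.Int.floordiv_eq_ediv_of_pos (show (0:Int) < 5 by norm_num)]
        rw [if_neg (by omega : ¬ PySem.Int.floordiv v 5 + 1 = 0)]
        have := ih (PySem.Int.floordiv v 5) 1 hqlt hqnn (Or.inr rfl) (by omega)
        rw [this]
        congr 1
      · have hm : PySem.Int.mod (v + c) 5 =
            (if PySem.Int.mod v 5 + c = 5 then 0 else PySem.Int.mod v 5 + c) := by
          split_ifs <;> omega
        have hf : PySem.Int.floordiv (v + c) 5 =
            PySem.Int.floordiv v 5 + (if PySem.Int.mod v 5 + c = 5 then 1 else 0) := by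
          split_ifs <;> omega
        simp only [balancePass, ht, if_pos (by omega : (3:Int) ≥ 3),
                   if_pos (by omega : (4:Int) ≥ 3), if_pos (by omega : (5:Int) ≥ 3)]
        conv_lhs => rw [snafuListA]
        simp only [toSnafuStepA, hm, ht, hf]
        norm_num
        rw [← PySem.Int.floordiv_eq_ediv_of_pos (show (0:Int) < 5 by norm_num)]
        rw [if_neg (by omega : ¬ PySem.Int.floordiv v 5 + 1 = 0)]
        have := ih (PySem.Int.floordiv v 5) 1 hqlt hqnn (Or.inr rfl) (by omega)
        rw [this]
        congr 1
      · have hm : PySem.Int.mod (v + c) 5 =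
            (if PySem.Int.mod v 5 + c = 5 then 0 else PySem.Int.mod v 5 + c) := by
          split_ifs <;> omega
        have hf : PySem.Int.floordiv (v + c) 5 =
            PySem.Int.floordiv v 5 + (if PySem.Int.mod v 5 + c = 5 then 1 else 0) := by
          split_ifs <;> omega
        simp only [balancePass, ht, if_pos (by omega : (3:Int) ≥ 3),
                   if_pos (by omega : (4:Int) ≥ 3), if_pos (by omega : (5:Int) ≥ 3)]
        conv_lhs => rw [snafuListA]
        simp only [toSnafuStepA, hm, ht, hf]
        norm_num
        rw [← PySem.Int.floordiv_eq_ediv_of_pos (show (0:Int) < 5 by norm_num)]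
        rw [if_neg (by omega : ¬ PySem.Int.floordiv v 5 + 1 = 0)]
        have := ih (PySem.Int.floordiv v 5) 1 hqlt hqnn (Or.inr rfl) (by omega)
        rw [this]
        congr 1

-- ===== VERDICT (by name: the statement is the Claim_ definition above) =====
theorem to_snafu_spec : Claim_equal_to_snafu := by
  intro value _
  unfold Spec_to_snafu to_snafu to_snafu_alt snafuNonnegB
  rw [loopA_eq_listA value.natAbs value le_rfl ""]
  by_cases hneg : value < 0
  · rw [if_pos hneg, if_neg (by omega : ¬ (-value = 0))]
    have h1 : snafuListA value = (snafuListA (-value)).map negCharB := by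
      have := listA_neg (-value).natAbs (-value) le_rfl (by omega)
      rw [neg_neg] at this
      simpa using this
    have h2 : snafuListA (-value) = (balancePass (snafuDigitsB (-value)) 0).reverse := by
      have := listA_pos (-value).natAbs (-value) 0 le_rfl (by omega) (Or.inl rfl) (by omega)
      rwa [add_zero] at this
    rw [h1, h2]
    simp
  · rw [if_neg hneg]
    by_cases h0 : value = 0
    · subst h0
      norm_num
      rw [snafuListA]
      simp [toSnafuStepA, (by decide : PySem.Int.mod (0:Int) 5 = 0),
            (by decide : PySem.Int.floordiv (0:Int) 5 = 0)]
      decide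
    · rw [if_neg h0]
      have := listA_pos value.natAbs value 0 le_rfl (by omega) (Or.inl rfl) (by omega)
      rw [add_zero] at this
      rw [this]
      simp
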